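-- pv_equiv track=rewrite | github.com/kn5suzuki/atcoder | abc299/c.py | solve
-- ===== SOURCE A (Python) =====
-- def solve(s):
--     ans = 0
--     counting = False
--     valid = False
--     tmp = 0
--     for letter in s:
--         if letter == "-":
--             valid = True
--         if letter == "o" and not counting:
--             counting = True
--             tmp = 1
--         elif letter == "o" and counting:
--             tmp += 1
--         elif letter == "-" and counting:
--             counting = False
--             ans = tmp if tmp > ans else ans
--     if counting and valid and tmp > ans:
--         ans = tmp
--     return ans if ans > 0 and valid else -1
-- ===== SOURCE B (Python) =====
-- def solve(s):
--     if "-" not in s: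
--         return -1
--     best = max(part.count("o") for part in s.split("-"))
--     return best if best > 0 else -1
-- ===== Notes on version B (the rewrite author's own statement) =====
-- stated objective: simpler
-- what changed: Replaces A's stateful single pass (ans/counting/valid/tmp flags updated per character) with a declarative split on the dash separator followed by max over per-segment letter counts.
import Mathlib
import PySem

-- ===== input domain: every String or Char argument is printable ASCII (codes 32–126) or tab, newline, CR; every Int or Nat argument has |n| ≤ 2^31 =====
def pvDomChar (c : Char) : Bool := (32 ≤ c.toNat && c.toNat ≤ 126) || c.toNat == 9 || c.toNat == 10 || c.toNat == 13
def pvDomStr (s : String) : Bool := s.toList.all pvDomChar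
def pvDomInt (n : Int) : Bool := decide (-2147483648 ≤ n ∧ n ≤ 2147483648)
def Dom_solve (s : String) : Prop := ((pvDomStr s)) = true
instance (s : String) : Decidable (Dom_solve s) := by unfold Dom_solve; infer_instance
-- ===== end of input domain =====

-- B replaces A's stateful single pass by split-on-'-' then max of per-segment 'o' counts (objective: simpler).

-- ===== PORT A =====
-- one iteration of A's for-loop over state (ans, counting, valid, tmp)
def solveStep (st : Int × Bool × Bool × Int) (letter : Char) : Int × Bool × Bool × Int :=
  let ans := st.1
  let counting := st.2.1
  let valid0 := st.2.2.1
  let valid := if letter = '-' then true else valid0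
  let tmp := st.2.2.2
  if letter = 'o' ∧ counting = false then (ans, true, valid, 1)
  else if letter = 'o' ∧ counting = true then (ans, counting, valid, tmp + 1)
  else if letter = '-' ∧ counting = true then ((if tmp > ans then tmp else ans), false, valid, tmp)
  else (ans, counting, valid, tmp)

def solve (s : String) : Int :=
  let st := s.toList.foldl solveStep (0, false, false, 0)
  let ans0 := st.1
  let counting := st.2.1
  let valid := st.2.2.1
  let tmp := st.2.2.2
  let ans := if counting = true ∧ valid = true ∧ tmp > ans0 then tmp else ans0
  if ans > 0 ∧ valid = true then ans else -1

-- ===== PORT B =====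
def solve_alt (s : String) : Int :=
  if PySem.Str.isIn "-" s = false then -1
  else
    match PySem.Str.split? s "-" with
    | none => -1        -- unreachable: the separator "-" is nonempty
    | some parts =>
      let counts : List Int := parts.map (fun p => (PySem.Str.count p "o" : Int))
      match PySem.List.max? counts (fun x => x) with
      | some best => if best > 0 then best else -1
      | none => -1      -- unreachable: split always returns a nonempty list

-- ===== PRECONDITION & SPEC =====
def Spec_solve (s : String) (out : Int) : Prop := out = solve_alt s
instance (s : String) (out : Int) : Decidable (Spec_solve s out) := by unfold Spec_solve; infer_instance

-- ===== CLAIM (what is proved, stated in full; the proofs are below) =====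
def Claim_equal_solve : Prop := ∀ (s : String), Dom_solve s → Spec_solve s (solve s)

-- ===== LEMMAS AND PROOFS =====

-- (head segment before the first '-', remaining '-'-separated segments)
def segsP : List Char → List Char × List (List Char)
  | [] => ([], [])
  | d :: rest =>
    let p := segsP rest
    if d = '-' then ([], p.1 :: p.2) else (d :: p.1, p.2)

theorem segsP_cons (d : Char) (l : List Char) :
    segsP (d :: l) = if d = '-' then ([], (segsP l).1 :: (segsP l).2)
      else (d :: (segsP l).1, (segsP l).2) := rfl

-- 'o'-count of the head segment, and of the later segments
def cnt0 (l : List Char) : Int := ((segsP l).1.count 'o' : Int)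
def cnts' (l : List Char) : List Int := (segsP l).2.map (fun q => ((q.count 'o' : Nat) : Int))

theorem splitOn_go_dash (l : List Char) :
    ∀ (fuel : Nat) (cur : List Char) (acc : List (List Char)), l.length < fuel →
      PySem.Chars.splitOn.go ['-'] fuel l cur acc
        = acc.reverse ++ ((cur.reverse ++ (segsP l).1) :: (segsP l).2) := by
  induction l with
  | nil =>
    intro fuel cur acc h
    match fuel with
    | f + 1 => simp [PySem.Chars.splitOn.go, segsP]
  | cons d rest ih =>
    intro fuel cur acc h
    match fuel with
    | f + 1 =>
      by_cases hd : d = '-'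
      · subst hd
        rw [show PySem.Chars.splitOn.go ['-'] (f+1) ('-' :: rest) cur acc
              = PySem.Chars.splitOn.go ['-'] f rest [] (cur.reverse :: acc) by
            simp [PySem.Chars.splitOn.go, List.isPrefixOf]]
        rw [ih f [] (cur.reverse :: acc) (by simpa using h)]
        simp [segsP_cons]
      · rw [show PySem.Chars.splitOn.go ['-'] (f+1) (d :: rest) cur acc
              = PySem.Chars.splitOn.go ['-'] f rest (d :: cur) acc by
            simp [PySem.Chars.splitOn.go, List.isPrefixOf, show ¬ ('-' = d) from fun e => hd e.symm]]
        rw [ih f (d :: cur) acc (by simpa using h)]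
        simp [segsP_cons, hd]

theorem splitOn_dash (l : List Char) :
    PySem.Chars.splitOn l ['-'] = (segsP l).1 :: (segsP l).2 := by
  unfold PySem.Chars.splitOn
  rw [splitOn_go_dash l (l.length + 1) [] [] (by omega)]
  simp

theorem count_go_single (c : Char) (l : List Char) :
    ∀ (fuel : Nat) (acc : Nat), l.length ≤ fuel →
      PySem.Chars.count.go [c] fuel l acc = acc + l.count c := by
  induction l with
  | nil =>
    intro fuel acc h
    match fuel with
    | 0 => simp [PySem.Chars.count.go]
    | f + 1 => simp [PySem.Chars.count.go]
  | cons d rest ih =>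
    intro fuel acc h
    match fuel with
    | f + 1 =>
      by_cases hd : c = d
      · subst hd
        rw [show PySem.Chars.count.go [c] (f+1) (c :: rest) acc
              = PySem.Chars.count.go [c] f rest (acc + 1) by
            simp [PySem.Chars.count.go, List.isPrefixOf]]
        rw [ih f (acc + 1) (by simpa using h)]
        simp [List.count_cons]
        omega
      · rw [show PySem.Chars.count.go [c] (f+1) (d :: rest) acc
              = PySem.Chars.count.go [c] f rest acc by
            simp [PySem.Chars.count.go, List.isPrefixOf, hd]]
        rw [ih f acc (by simpa using h)]
        simp [List.count_cons, show ¬ (d = c) from fun e => hd e.symm]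

theorem count_single (c : Char) (l : List Char) :
    PySem.Chars.count l [c] = l.count c := by
  unfold PySem.Chars.count
  rw [if_neg (by simp), count_go_single c l l.length 0 (le_refl _)]
  omega

-- A's post-loop finalisation
def finA (st : Int × Bool × Bool × Int) : Int :=
  let ans := if st.2.1 = true ∧ st.2.2.1 = true ∧ st.2.2.2 > st.1 then st.2.2.2 else st.1
  if ans > 0 ∧ st.2.2.1 = true then ans else -1

theorem solve_eq_finA (s : String) :
    solve s = finA (s.toList.foldl solveStep (0, false, false, 0)) := rfl

theorem step_valid (st : Int × Bool × Bool × Int) (d : Char) :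
    (solveStep st d).2.2.1 = (if d = '-' then true else st.2.2.1) := by
  unfold solveStep
  by_cases h1 : d = '-' <;> by_cases h2 : d = 'o' <;> by_cases h3 : st.2.1 <;> simp_all

theorem valid_pres (l : List Char) (h : '-' ∉ l) :
    ∀ st : Int × Bool × Bool × Int, st.2.2.1 = false →
      (l.foldl solveStep st).2.2.1 = false := by
  induction l with
  | nil => intro st hst; simpa using hst
  | cons d rest ih =>
    intro st hst
    have hd : d ≠ '-' := fun hd => h (hd ▸ List.mem_cons_self)
    rw [List.foldl_cons]
    exact ih (fun hm => h (List.mem_cons_of_mem _ hm)) _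
      (by rw [step_valid, if_neg hd, hst])

-- the loop after the first '-' (valid = true); two reachable state shapes
theorem loop_val (l : List Char) :
    (∀ ans tmp : Int, 0 ≤ ans →
        finA (l.foldl solveStep (ans, false, true, tmp))
          = (if (cnts' l).foldl max (max ans (cnt0 l)) > 0
              then (cnts' l).foldl max (max ans (cnt0 l)) else -1))
    ∧ (∀ ans tmp : Int, 0 ≤ ans → 0 < tmp →
        finA (l.foldl solveStep (ans, true, true, tmp))
          = (if (cnts' l).foldl max (max ans (tmp + cnt0 l)) > 0
              then (cnts' l).foldl max (max ans (tmp + cnt0 l)) else -1)) := by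
  induction l with
  | nil =>
    constructor
    · intro ans tmp hans
      simp [finA, cnt0, cnts', segsP, max_eq_left hans]
    · intro ans tmp hans htmp
      have h1 : (if tmp > ans then tmp else ans) = max ans tmp := by
        rcases le_or_gt tmp ans with h | h <;> simp [max_def] <;> omega
      simp only [List.foldl_nil, finA, cnt0, cnts', segsP]
      simp only [List.map_nil, List.foldl_nil, add_zero, h1]
      have : 0 < max ans tmp := lt_of_lt_of_le htmp (le_max_right _ _)
      split_ifs <;> simp_all <;> omega
  | cons d rest ih =>
    constructor
    · intro ans tmp hans
      by_cases hdash : d = '-'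
      · subst hdash
        rw [List.foldl_cons,
          show solveStep (ans, false, true, tmp) '-' = (ans, false, true, tmp) by
            simp [solveStep],
          ih.1 ans tmp hans]
        simp [cnt0, cnts', segsP_cons, max_eq_left hans]
      · by_cases ho : d = 'o'
        · subst ho
          rw [List.foldl_cons,
            show solveStep (ans, false, true, tmp) 'o' = (ans, true, true, 1) by
              simp [solveStep],
            ih.2 ans 1 hans (by omega)]
          simp only [cnt0, cnts', segsP_cons, if_neg (by decide : ¬ ('o' = '-'))]
          simp [List.count_cons]
          ring_nf
        · rw [List.foldl_cons,
            show solveStep (ans, false, true, tmp) d = (ans, false, true, tmp) by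
              simp [solveStep, ho, hdash],
            ih.1 ans tmp hans]
          simp [cnt0, cnts', segsP_cons, hdash, List.count_cons, ho]
    · intro ans tmp hans htmp
      by_cases hdash : d = '-'
      · subst hdash
        have h1 : (if tmp > ans then tmp else ans) = max ans tmp := by
          rcases le_or_gt tmp ans with h | h <;> simp [max_def] <;> omega
        rw [List.foldl_cons,
          show solveStep (ans, true, true, tmp) '-'
              = ((if tmp > ans then tmp else ans), false, true, tmp) by
            simp [solveStep],
          h1, ih.1 (max ans tmp) tmp (le_trans hans (le_max_left _ _))]
        rw [show cnts' ('-' :: rest) = cnt0 rest :: cnts' rest from by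
              simp [cnts', cnt0, segsP_cons],
            show cnt0 ('-' :: rest) = 0 from by simp [cnt0, segsP_cons],
            List.foldl_cons, add_zero]
      · by_cases ho : d = 'o'
        · subst ho
          rw [List.foldl_cons,
            show solveStep (ans, true, true, tmp) 'o' = (ans, true, true, tmp + 1) by
              simp [solveStep],
            ih.2 ans (tmp + 1) hans (by omega)]
          have h2 : max ans (tmp + 1 + cnt0 rest) = max ans (tmp + cnt0 ('o' :: rest)) := by
            simp [cnt0, segsP_cons, List.count_cons]
            omega
          rw [show cnts' ('o' :: rest) = cnts' rest by simp [cnts', segsP_cons], h2]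
        · rw [List.foldl_cons,
            show solveStep (ans, true, true, tmp) d = (ans, true, true, tmp) by
              simp [solveStep, ho, hdash],
            ih.2 ans tmp hans htmp]
          simp [cnt0, cnts', segsP_cons, hdash, List.count_cons, ho]

-- the prefix before the first '-' (valid unchanged)
theorem pref_on (p : List Char) (h : '-' ∉ p) :
    ∀ (ans tmp : Int) (valid : Bool),
      p.foldl solveStep (ans, true, valid, tmp) = (ans, true, valid, tmp + (p.count 'o' : Int)) := by
  induction p with
  | nil => intro ans tmp valid; simp
  | cons d rest ih =>
    intro ans tmp valid
    have hd : d ≠ '-' := fun hd => h (hd ▸ List.mem_cons_self)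
    have hrest : '-' ∉ rest := fun hm => h (List.mem_cons_of_mem _ hm)
    by_cases ho : d = 'o'
    · subst ho
      rw [List.foldl_cons,
        show solveStep (ans, true, valid, tmp) 'o' = (ans, true, valid, tmp + 1) by
          simp [solveStep, hd],
        ih hrest]
      simp [List.count_cons]
      ring
    · rw [List.foldl_cons,
        show solveStep (ans, true, valid, tmp) d = (ans, true, valid, tmp) by
          simp [solveStep, hd, ho],
        ih hrest]
      simp [List.count_cons, ho]

theorem pref_off (p : List Char) (h : '-' ∉ p) (valid : Bool) :
    p.foldl solveStep (0, false, valid, 0)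
      = (0, decide (0 < p.count 'o'), valid, (p.count 'o' : Int)) := by
  induction p with
  | nil => simp
  | cons d rest ih =>
    have hd : d ≠ '-' := fun hd => h (hd ▸ List.mem_cons_self)
    have hrest : '-' ∉ rest := fun hm => h (List.mem_cons_of_mem _ hm)
    by_cases ho : d = 'o'
    · subst ho
      rw [List.foldl_cons,
        show solveStep (0, false, valid, 0) 'o' = (0, true, valid, 1) by
          simp [solveStep, hd],
        pref_on rest hrest]
      simp [List.count_cons]
      omega
    · rw [List.foldl_cons,
        show solveStep (0, false, valid, 0) d = (0, false, valid, 0) by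
          simp [solveStep, hd, ho],
        ih hrest]
      simp [List.count_cons, ho]

theorem segsP_append (p rest : List Char) (h : '-' ∉ p) :
    segsP (p ++ '-' :: rest) = (p, (segsP rest).1 :: (segsP rest).2) := by
  induction p with
  | nil => simp [segsP_cons]
  | cons d q ih =>
    have hd : d ≠ '-' := fun hd => h (hd ▸ List.mem_cons_self)
    rw [List.cons_append, segsP_cons, if_neg hd, ih (fun hm => h (List.mem_cons_of_mem _ hm))]

theorem exists_split_first (l : List Char) (h : '-' ∈ l) :
    ∃ p rest, '-' ∉ p ∧ l = p ++ '-' :: rest := by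
  induction l with
  | nil => simp at h
  | cons d rest ih =>
    by_cases hd : d = '-'
    · exact ⟨[], rest, by simp, by simp [hd]⟩
    · obtain ⟨p, r, hp, hr⟩ := ih (by rcases List.mem_cons.mp h with h1 | h1
                                      · exact absurd h1.symm hd
                                      · exact h1)
      exact ⟨d :: p, r, by
        intro hm
        rcases List.mem_cons.mp hm with e | e
        · exact hd e.symm
        · exact hp e, by simp [hr]⟩

-- ===== VERDICT (by name: the statement is the Claim_ definition above) =====
theorem solve_spec : Claim_equal_solve := by
  intro s _
  unfold Spec_solve
  by_cases hin : '-' ∈ s.toList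
  · -- '-' present: both sides are the max of per-segment 'o' counts (or -1)
    obtain ⟨p, rest, hp, hl⟩ := exists_split_first s.toList hin
    -- B side
    have hB : solve_alt s
        = (if (cnts' rest).foldl max (max (p.count 'o' : Int) (cnt0 rest)) > 0
            then (cnts' rest).foldl max (max (p.count 'o' : Int) (cnt0 rest)) else -1) := by
      have hIn : PySem.Str.isIn "-" s = true := by
        rw [PySem.Str.isIn_eq]
        exact (PySem.Chars.isIn_iff_infix _ _).mpr ⟨p, rest, by simp [hl]⟩
      unfold solve_alt
      rw [hIn, if_neg (by simp : ¬ (true = false))]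
      rw [show PySem.Str.split? s "-"
            = some ((PySem.Chars.splitOn s.toList ['-']).map String.ofList) by
          simp [PySem.Str.split?, PySem.Chars.split?, show "-".toList = ['-'] from rfl]]
      rw [splitOn_dash, hl, segsP_append p rest hp]
      simp only [List.map_cons, List.map_map]
      rw [show (fun pt => ((PySem.Str.count pt "o" : Nat) : Int)) ∘ String.ofList
            = fun q => ((q.count 'o' : Nat) : Int) by
          funext q
          simp [PySem.Str.count_eq, show "o".toList = ['o'] from rfl, count_single]]
      rw [show PySem.Str.count (String.ofList p) "o" = p.count 'o' by
          simp [PySem.Str.count_eq, show "o".toList = ['o'] from rfl, count_single]]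
      rw [PySem.List.max?_id_cons]
      simp [cnts', cnt0, count_single]
    -- A side
    rw [solve_eq_finA, hl, List.foldl_append, pref_off p hp false]
    have hstep : solveStep (0, decide (0 < p.count 'o'), false, (p.count 'o' : Int)) '-'
        = ((p.count 'o' : Int), false, true, (p.count 'o' : Int)) := by
      by_cases hc : 0 < p.count 'o'
      · simp [solveStep, hc]
      · simp [solveStep, hc]
        omega
    rw [List.foldl_cons, hstep, (loop_val rest).1 _ _ (by positivity), hB]
  · -- no '-' anywhere: A keeps valid = false and returns -1; B returns -1 at once
    have hA : solve s = -1 := by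
      rw [solve_eq_finA]
      have hv := valid_pres s.toList hin (0, false, false, 0) rfl
      unfold finA
      simp [hv]
    have hB : solve_alt s = -1 := by
      unfold solve_alt
      rw [show PySem.Str.isIn "-" s = false by
        rw [PySem.Str.isIn_eq]
        exact (PySem.Chars.isIn_eq_false_iff _ _).mpr
          (fun hinf => hin (by
            have := hinf.mem (a := '-') (by simp)
            exact this))]
      simp
    rw [hA, hB]
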